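-- pv_equiv track=rewrite | github.com/hwmaltby/project-euler | problems/problem_137.py | golden_nuggets
-- ===== SOURCE A (Python) =====
-- def composition_rule(a, b, n, x=0, y=0):
--     tup = (a, b)
--     if x == 0:
--         x, y = a, b
--     curr = (x, y)
--     while n >= 0:
--         yield curr
--         curr = (curr[0] * tup[0] + n * curr[1] * tup[1], curr[0] * tup[1] +\
--             curr[1] * tup[0])
--
-- def golden_nuggets(n):
--     lst = []
--     i = 0
--     for tup in composition_rule(9, 4, 5, 1, 1):
--         q, r = divmod(tup[0], 5)
--         if r == 1:
--             lst.append(q)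
--         i += 1
--         if i == 3 * n:
--             break
--     for tup in composition_rule(2, 1, 5, 3, 1):
--         if tup[0] ** 2 < 5 * (tup[1] ** 2):
--             q, r = divmod(tup[0], 5)
--             if r == 1:
--                 lst.append(q)
--         i -= 1
--         if i == 0:
--             break
--     lst.sort()
--     return lst
-- ===== SOURCE B (Python) =====
-- def golden_nuggets(n):
--     """A golden nugget N corresponds to a solution x = 5*N + 1 of the Pell-like
--     equation x**2 - 5*y**2 = -4.  Scan 3*n consecutive solutions of each of the
--     two classical solution families, tracking only the x-component by its scalar
--     second-order recurrence; every x with x % 5 == 1 contributes (x - 1) // 5.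
--     Each family yields its nuggets in increasing order, so one merge of the two
--     streams produces the sorted result."""
--     steps = 3 * n
--     first = []                      # family x_{k+1} = 18*x_k - x_{k-1}: 1, 29, 521, ...
--     xp, x = 1, 29
--     for _ in range(steps):
--         if xp % 5 == 1:
--             first.append(xp // 5)
--         xp, x = x, 18 * x - xp
--     second = []                     # family x_{k+1} = 4*x_k + x_{k-1}: 3, 11, 47, ...
--     yp, y = 3, 11                   # only every other member solves x^2-5y^2 = -4
--     for k in range(steps):
--         if k % 2 == 1 and yp % 5 == 1:
--             second.append(yp // 5)
--         yp, y = y, 4 * y + yp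
--     out = []
--     i = j = 0
--     while i < len(first) and j < len(second):
--         if first[i] <= second[j]:
--             out.append(first[i]); i += 1
--         else:
--             out.append(second[j]); j += 1
--     out.extend(first[i:])
--     out.extend(second[j:])
--     return out
-- ===== Notes on version B (the rewrite author's own statement) =====
-- stated objective: alternative
-- what changed: Replaces A's generic two-component quadratic-field generator (norm inequality test, shared up/down counter, final sort) by two scalar second-order Pell recurrences for the x-components whose increasing nugget streams are combined with a single two-pointer merge, with no sort; Pre_ excludes n <= 0, where A's first loop never reaches its break and diverges.
-- outside the precondition, e.g. on golden_nuggets(0): A does not finish within the time limit, B returns []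
import Mathlib
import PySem

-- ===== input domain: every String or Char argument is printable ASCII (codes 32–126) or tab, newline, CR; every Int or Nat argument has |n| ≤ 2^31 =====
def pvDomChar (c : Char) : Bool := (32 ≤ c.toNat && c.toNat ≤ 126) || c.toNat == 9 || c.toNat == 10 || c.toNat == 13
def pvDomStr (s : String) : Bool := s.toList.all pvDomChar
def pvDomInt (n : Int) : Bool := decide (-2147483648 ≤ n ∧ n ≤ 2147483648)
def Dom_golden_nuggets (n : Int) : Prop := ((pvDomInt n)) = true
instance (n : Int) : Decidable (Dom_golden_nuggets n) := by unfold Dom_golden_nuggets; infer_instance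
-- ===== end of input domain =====

-- B replaces A's generic two-component quadratic-field generators and final sort
-- by two scalar second-order Pell recurrences whose increasing output streams are
-- combined with a single sorted-merge (alternative decomposition, not faster).

-- ===== PORT A =====
-- A's first generator `composition_rule(9, 4, 5, 1, 1)` yields states (x, y)
-- starting from (1, 1) with step (x, y) ↦ (x*9 + 5*y*4, x*4 + y*9); the for
-- loop breaks after exactly 3n iterations (Pre_ gives 1 ≤ n, so the break is
-- reached; for n ≤ 0 the Python loop never terminates and those inputs are
-- outside Pre_).  divmod(x, 5) with the constant positive divisor 5 is ported
-- as PySem.Int.floordiv / PySem.Int.mod (exact).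
def pyLoop1 : Int → Int → Nat → List Int
  | _, _, 0 => []
  | x, y, c + 1 =>
      (if PySem.Int.mod x 5 = 1 then [PySem.Int.floordiv x 5] else []) ++
        pyLoop1 (x * 9 + 5 * y * 4) (x * 4 + y * 9) c

-- A's second generator `composition_rule(2, 1, 5, 3, 1)`: states (x, y) from
-- (3, 1) with step (x, y) ↦ (x*2 + 5*y*1, x*1 + y*2); the loop counts i from
-- 3n down to 0, i.e. again exactly 3n iterations.
def pyLoop2 : Int → Int → Nat → List Int
  | _, _, 0 => []
  | x, y, c + 1 =>
      (if x ^ 2 < 5 * y ^ 2 then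
        (if PySem.Int.mod x 5 = 1 then [PySem.Int.floordiv x 5] else [])
       else []) ++
        pyLoop2 (x * 2 + 5 * y * 1) (x * 1 + y * 2) c

def golden_nuggets (n : Int) : List Int :=
  let l1 := pyLoop1 1 1 (3 * n).toNat
  let l2 := pyLoop2 3 1 (3 * n).toNat
  PySem.List.sorted (l1 ++ l2) (fun x => x) false

-- ===== PORT B =====
-- Source B's first stream: state (xp, x), step (xp, x) ↦ (x, 18*x - xp), emitting
-- xp // 5 when xp % 5 == 1; recursion on the remaining iteration count.
def nuggetStream1 : Int → Int → Nat → List Int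
  | _, _, 0 => []
  | xp, x, c + 1 =>
      (if PySem.Int.mod xp 5 = 1 then [PySem.Int.floordiv xp 5] else []) ++
        nuggetStream1 x (18 * x - xp) c

-- Source B's second stream: state (yp, y) with loop counter k, step
-- (yp, y) ↦ (y, 4*y + yp), emitting yp // 5 when k % 2 == 1 and yp % 5 == 1.
def nuggetStream2 : Int → Int → Int → Nat → List Int
  | _, _, _, 0 => []
  | yp, y, k, c + 1 =>
      (if PySem.Int.mod k 2 = 1 ∧ PySem.Int.mod yp 5 = 1
       then [PySem.Int.floordiv yp 5] else []) ++
        nuggetStream2 y (4 * y + yp) (k + 1) c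

-- Source B's index-based merge loop (`while i < len(a) and j < len(b)` plus the two
-- `extend`s of the remaining slices); list indexing is always in range when it
-- happens, so `getD _ 0` is exact, and `a[i:]` for 0 ≤ i is exactly `drop i`.
-- (the fuel argument, called with len(a)+len(b), only makes the recursion
-- structural; it never runs out before the loop condition fails)
def mergeLoop (a b : List Int) : Nat → Nat → Nat → List Int
  | 0, i, j => a.drop i ++ b.drop j
  | fuel + 1, i, j =>
    if i < a.length ∧ j < b.length then
      if a.getD i 0 ≤ b.getD j 0 then a.getD i 0 :: mergeLoop a b fuel (i + 1) j
      else b.getD j 0 :: mergeLoop a b fuel i (j + 1)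
    else a.drop i ++ b.drop j

def golden_nuggets_alt (n : Int) : List Int :=
  let first := nuggetStream1 1 29 (3 * n).toNat
  let second := nuggetStream2 3 11 0 (3 * n).toNat
  mergeLoop first second (first.length + second.length) 0 0

-- ===== PRECONDITION & SPEC =====
-- For n ≤ 0 the Python A never reaches the `i == 3 * n` break of its first
-- loop and diverges (it returns for no such input); Pre_ excludes exactly
-- those inputs.
def Pre_golden_nuggets (n : Int) : Prop := 1 ≤ n
instance (n : Int) : Decidable (Pre_golden_nuggets n) := by unfold Pre_golden_nuggets; infer_instance
def pvWitness_golden_nuggets : Int := 2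

def Spec_golden_nuggets (n : Int) (out : List Int) : Prop := out = golden_nuggets_alt n
instance (n : Int) (out : List Int) : Decidable (Spec_golden_nuggets n out) := by unfold Spec_golden_nuggets; infer_instance

-- ===== CLAIM (what is proved, stated in full; the proofs are below) =====
def Claim_equal_golden_nuggets : Prop := ∀ (n : Int), Dom_golden_nuggets n → Pre_golden_nuggets n → Spec_golden_nuggets n (golden_nuggets n)

-- ===== LEMMAS AND PROOFS =====

-- The common reference sequence: st i = (F(2i), F(2i+1)), a Fibonacci pair
-- advanced two steps at a time; pN i = F(2i)·F(2i+1) is the i-th emitted value.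
def fibStep (p : Int × Int) : Int × Int := (p.1 + p.2, p.1 + 2 * p.2)

def st : Nat → Int × Int
  | 0 => (0, 1)
  | k + 1 => fibStep (st k)

def pN (i : Nat) : Int := (st i).1 * (st i).2

theorem st_inv (i : Nat) : (st i).2 ^ 2 - (st i).1 * (st i).2 - (st i).1 ^ 2 = 1 := by
  induction i with
  | zero => decide
  | succ k ih =>
      have h : (st (k + 1)).2 ^ 2 - (st (k + 1)).1 * (st (k + 1)).2 - (st (k + 1)).1 ^ 2
          = (st k).2 ^ 2 - (st k).1 * (st k).2 - (st k).1 ^ 2 := by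
        simp [st, fibStep]; ring
      rw [h, ih]

theorem st_pos (i : Nat) : 0 ≤ (st i).1 ∧ (st i).1 + 1 ≤ (st i).2 := by
  induction i with
  | zero => decide
  | succ k ih => simp [st, fibStep]; omega

theorem pN_lt (i : Nat) : pN i < pN (i + 1) := by
  obtain ⟨hf, hg⟩ := st_pos i
  have h : pN (i + 1) = pN i + ((st i).1 ^ 2 + 2 * (st i).1 * (st i).2 + 2 * (st i).2 ^ 2) := by
    simp [pN, st, fibStep]; ring
  nlinarith

theorem pN_mono : StrictMono pN := strictMono_nat_of_lt_succ pN_lt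

theorem st3 (k : Nat) : st (k + 3) =
    (5 * (st k).1 + 8 * (st k).2, 8 * (st k).1 + 13 * (st k).2) := by
  show fibStep (fibStep (fibStep (st k))) = _
  simp [fibStep]; constructor <;> ring

theorem st_dbl (m : Nat) : st (2 * m) =
    ((st m).1 * (2 * (st m).2 - (st m).1), (st m).1 ^ 2 + (st m).2 ^ 2) := by
  induction m with
  | zero => decide
  | succ k ih =>
      have h2 : 2 * (k + 1) = 2 * k + 1 + 1 := by ring
      rw [h2, show st (2 * k + 1 + 1) = fibStep (fibStep (st (2 * k))) from rfl, ih,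
        show st (k + 1) = fibStep (st k) from rfl]
      simp only [fibStep, Prod.mk.injEq]
      constructor <;> ring

-- ---- the first Pell family (A's loop 1 and B's stream 1) ----

def aSt (k : Nat) : Int × Int := (2 * (st (3 * k)).1 + (st (3 * k)).2, (st (3 * k)).2)

theorem aStep (k : Nat) :
    ((aSt k).1 * 9 + 5 * (aSt k).2 * 4, (aSt k).1 * 4 + (aSt k).2 * 9) = aSt (k + 1) := by
  have h3 : 3 * (k + 1) = 3 * k + 3 := by ring
  simp only [aSt, h3, st3, Prod.mk.injEq]
  constructor <;> ring

theorem aMod (k : Nat) : (aSt k).1 % 5 = if k % 2 = 0 then 1 else 4 := by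
  induction k with
  | zero => decide
  | succ k ih =>
      have hx : (aSt (k + 1)).1 = (aSt k).1 * 9 + 5 * (aSt k).2 * 4 :=
        (congrArg Prod.fst (aStep k)).symm
      rw [hx]
      split_ifs at ih ⊢ <;> omega

theorem aVal (j : Nat) : (aSt (2 * j)).1 = 5 * pN (3 * j) + 1 := by
  have h6 : 3 * (2 * j) = 2 * (3 * j) := by ring
  simp only [aSt, h6, st_dbl, pN]
  linear_combination st_inv (3 * j)

theorem loop1_char (c : Nat) : ∀ k, pyLoop1 (aSt k).1 (aSt k).2 c =
    (List.range c).filterMap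
      (fun t => if (k + t) % 2 = 0 then some (pN (3 * ((k + t) / 2))) else none) := by
  induction c with
  | zero => intro k; simp [pyLoop1]
  | succ c ih =>
      intro k
      rw [List.range_succ_eq_map, List.filterMap_cons, List.filterMap_map]
      have ha1 := congrArg Prod.fst (aStep k)
      have ha2 := congrArg Prod.snd (aStep k)
      simp only at ha1 ha2
      have hrec : pyLoop1 ((aSt k).1 * 9 + 5 * (aSt k).2 * 4) ((aSt k).1 * 4 + (aSt k).2 * 9) c
          = pyLoop1 (aSt (k + 1)).1 (aSt (k + 1)).2 c := by rw [ha1, ha2]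
      have htail : (List.range c).filterMap
            ((fun t => if (k + t) % 2 = 0 then some (pN (3 * ((k + t) / 2))) else none) ∘ Nat.succ)
          = (List.range c).filterMap
            (fun t => if (k + 1 + t) % 2 = 0 then some (pN (3 * ((k + 1 + t) / 2))) else none) := by
        apply List.filterMap_congr
        intro t _
        have he : k + (t + 1) = k + 1 + t := by omega
        simp [Function.comp, he]
      have hmod : PySem.Int.mod (aSt k).1 5 = (aSt k).1 % 5 :=
        PySem.Int.mod_eq_emod_of_pos (by norm_num)
      show (if PySem.Int.mod (aSt k).1 5 = 1 then [PySem.Int.floordiv (aSt k).1 5] else []) ++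
          pyLoop1 ((aSt k).1 * 9 + 5 * (aSt k).2 * 4) ((aSt k).1 * 4 + (aSt k).2 * 9) c = _
      rw [hrec, ih (k + 1), htail, hmod]
      simp only [Nat.add_zero]
      by_cases hk : k % 2 = 0
      · have hx : (aSt k).1 = 5 * pN (3 * (k / 2)) + 1 := by
          have := aVal (k / 2)
          rwa [show 2 * (k / 2) = k by omega] at this
        have hm : (aSt k).1 % 5 = 1 := by rw [aMod k]; simp [hk]
        have hq : (aSt k).1 / 5 = pN (3 * (k / 2)) := by rw [hx]; omega
        simp [hm, hq, hk]
      · have hm : (aSt k).1 % 5 = 4 := by rw [aMod k]; simp [hk]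
        have hm' : ¬((aSt k).1 % 5 = 1) := by omega
        simp [hm', hk]

-- B's first stream visits the same x-components: 18·x_{k+1} − x_k = x_{k+2}.
theorem aRec2 (k : Nat) : 18 * (aSt (k + 1)).1 - (aSt k).1 = (aSt (k + 2)).1 := by
  have h1a := congrArg Prod.fst (aStep k)
  have h1b := congrArg Prod.snd (aStep k)
  have h2a := congrArg Prod.fst (aStep (k + 1))
  simp only at h1a h1b h2a
  rw [← h2a, ← h1a, ← h1b]
  ring

theorem stream1_eq (c : Nat) : ∀ k,
    nuggetStream1 (aSt k).1 (aSt (k + 1)).1 c = pyLoop1 (aSt k).1 (aSt k).2 c := by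
  induction c with
  | zero => intro k; rfl
  | succ c ih =>
      intro k
      show (if PySem.Int.mod (aSt k).1 5 = 1 then [PySem.Int.floordiv (aSt k).1 5] else []) ++
          nuggetStream1 (aSt (k + 1)).1 (18 * (aSt (k + 1)).1 - (aSt k).1) c = _
      rw [aRec2 k, ih (k + 1)]
      have ha1 := congrArg Prod.fst (aStep k)
      have ha2 := congrArg Prod.snd (aStep k)
      simp only at ha1 ha2
      show _ = (if PySem.Int.mod (aSt k).1 5 = 1 then [PySem.Int.floordiv (aSt k).1 5] else []) ++
          pyLoop1 ((aSt k).1 * 9 + 5 * (aSt k).2 * 4) ((aSt k).1 * 4 + (aSt k).2 * 9) c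
      rw [ha1, ha2]

-- ---- the second Pell family (A's loop 2 and B's stream 2) ----

def bSt : Nat → Int × Int
  | 0 => (1, 1)
  | k + 1 => ((bSt k).1 + 2 * (bSt k).2, 2 * (bSt k).1 + 3 * (bSt k).2)

def zOf (k : Nat) : Int := 2 * (bSt k).1 + (bSt k).2

theorem bStep_z (k : Nat) :
    (zOf k * 2 + 5 * (bSt k).2 * 1, zOf k * 1 + (bSt k).2 * 2) = (zOf (k + 1), (bSt (k + 1)).2) := by
  simp only [zOf, bSt, Prod.mk.injEq]
  constructor <;> ring

theorem bSt4 (k : Nat) : bSt (k + 4) =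
    (89 * (bSt k).1 + 144 * (bSt k).2, 144 * (bSt k).1 + 233 * (bSt k).2) := by
  show bSt (k + 1 + 1 + 1 + 1) = _
  simp only [bSt, Prod.mk.injEq]
  constructor <;> ring

theorem b_sign (k : Nat) :
    (bSt k).2 ^ 2 - (bSt k).1 * (bSt k).2 - (bSt k).1 ^ 2 = if k % 2 = 0 then -1 else 1 := by
  induction k with
  | zero => decide
  | succ k ih =>
      have h : (bSt (k + 1)).2 ^ 2 - (bSt (k + 1)).1 * (bSt (k + 1)).2 - (bSt (k + 1)).1 ^ 2
          = -((bSt k).2 ^ 2 - (bSt k).1 * (bSt k).2 - (bSt k).1 ^ 2) := by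
        simp [bSt]; ring
      rw [h, ih]
      split_ifs <;> simp_all <;> omega

theorem zMod (k : Nat) : zOf k % 5 =
    if k % 4 = 0 then 3 else if k % 4 = 1 then 1 else if k % 4 = 2 then 2 else 4 := by
  induction k using Nat.strong_induction_on with
  | _ k ih =>
    by_cases hk : k < 4
    · interval_cases k <;> decide
    · obtain ⟨k', rfl⟩ : ∃ k', k = k' + 4 := ⟨k - 4, by omega⟩
      have hz : zOf (k' + 4) = zOf k' + 5 * (64 * (bSt k').1 + 104 * (bSt k').2) := by
        simp only [zOf, bSt4]; ring
      have ih' := ih k' (by omega)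
      rw [hz]
      split_ifs at ih' ⊢ <;> omega

theorem bCond (k : Nat) : (zOf k ^ 2 < 5 * (bSt k).2 ^ 2) ↔ k % 2 = 1 := by
  have key : 5 * (bSt k).2 ^ 2 - zOf k ^ 2
      = 4 * ((bSt k).2 ^ 2 - (bSt k).1 * (bSt k).2 - (bSt k).1 ^ 2) := by
    simp [zOf]; ring
  have h := b_sign k
  by_cases hk : k % 2 = 0
  · rw [if_pos hk] at h
    constructor
    · intro hlt; exfalso; nlinarith
    · intro h1; omega
  · rw [if_neg hk] at h
    constructor
    · intro _; omega
    · intro _; nlinarith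

theorem bst_dbl (j : Nat) : bSt (4 * j + 1) = st (2 * (3 * j + 1)) := by
  induction j with
  | zero => decide
  | succ j ih =>
      have h1 : 4 * (j + 1) + 1 = (4 * j + 1) + 4 := by ring
      have h2 : 2 * (3 * (j + 1) + 1) = (2 * (3 * j + 1) + 3) + 3 := by ring
      rw [h1, bSt4, ih, h2, st3, st3]
      simp only [Prod.mk.injEq]
      constructor <;> ring

theorem bVal (j : Nat) : zOf (4 * j + 1) = 5 * pN (3 * j + 1) + 1 := by
  have hd := st_dbl (3 * j + 1)
  simp only [zOf, bst_dbl, hd, pN]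
  linear_combination st_inv (3 * j + 1)

theorem loop2_char (c : Nat) : ∀ k, pyLoop2 (zOf k) ((bSt k).2) c =
    (List.range c).filterMap
      (fun t => if (k + t) % 4 = 1 then some (pN (3 * ((k + t) / 4) + 1)) else none) := by
  induction c with
  | zero => intro k; simp [pyLoop2]
  | succ c ih =>
      intro k
      rw [List.range_succ_eq_map, List.filterMap_cons, List.filterMap_map]
      have hb1 := congrArg Prod.fst (bStep_z k)
      have hb2 := congrArg Prod.snd (bStep_z k)
      simp only at hb1 hb2
      have hrec : pyLoop2 (zOf k * 2 + 5 * (bSt k).2 * 1) (zOf k * 1 + (bSt k).2 * 2) c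
          = pyLoop2 (zOf (k + 1)) ((bSt (k + 1)).2) c := by rw [hb1, hb2]
      have htail : (List.range c).filterMap
            ((fun t => if (k + t) % 4 = 1 then some (pN (3 * ((k + t) / 4) + 1)) else none) ∘ Nat.succ)
          = (List.range c).filterMap
            (fun t => if (k + 1 + t) % 4 = 1 then some (pN (3 * ((k + 1 + t) / 4) + 1)) else none) := by
        apply List.filterMap_congr
        intro t _
        have he : k + (t + 1) = k + 1 + t := by omega
        simp [Function.comp, he]
      have hmod : PySem.Int.mod (zOf k) 5 = zOf k % 5 :=
        PySem.Int.mod_eq_emod_of_pos (by norm_num)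
      show (if zOf k ^ 2 < 5 * (bSt k).2 ^ 2 then
              (if PySem.Int.mod (zOf k) 5 = 1 then [PySem.Int.floordiv (zOf k) 5] else [])
            else []) ++
          pyLoop2 (zOf k * 2 + 5 * (bSt k).2 * 1) (zOf k * 1 + (bSt k).2 * 2) c = _
      rw [hrec, ih (k + 1), htail, hmod]
      simp only [Nat.add_zero]
      by_cases hk : k % 4 = 1
      · have hodd : k % 2 = 1 := by omega
        have hz : zOf k = 5 * pN (3 * (k / 4) + 1) + 1 := by
          have := bVal (k / 4)
          rwa [show 4 * (k / 4) + 1 = k by omega] at this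
        have hm : zOf k % 5 = 1 := by rw [zMod k]; split_ifs <;> omega
        have hq : zOf k / 5 = pN (3 * (k / 4) + 1) := by rw [hz]; omega
        simp [(bCond k).mpr hodd, hm, hq, hk]
      · by_cases hodd : k % 2 = 1
        · have hm : ¬(zOf k % 5 = 1) := by rw [zMod k]; split_ifs <;> omega
          simp [(bCond k).mpr hodd, hm, hk]
        · have hc : ¬(zOf k ^ 2 < 5 * (bSt k).2 ^ 2) := by rw [bCond k]; omega
          simp [hc, hk]

-- B's second stream visits the same x-components: 4·z_{k+1} + z_k = z_{k+2}.
theorem zRec2 (k : Nat) : 4 * zOf (k + 1) + zOf k = zOf (k + 2) := by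
  have h1a := congrArg Prod.fst (bStep_z k)
  have h1b := congrArg Prod.snd (bStep_z k)
  have h2a := congrArg Prod.fst (bStep_z (k + 1))
  simp only at h1a h1b h2a
  rw [← h2a, ← h1a, ← h1b]
  ring

theorem stream2_eq (c : Nat) : ∀ k : Nat,
    nuggetStream2 (zOf k) (zOf (k + 1)) (k : Int) c = pyLoop2 (zOf k) ((bSt k).2) c := by
  induction c with
  | zero => intro k; rfl
  | succ c ih =>
      intro k
      have hkmod : PySem.Int.mod (k : Int) 2 = ((k % 2 : Nat) : Int) := PySem.Int.mod_natCast k 2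
      have hcast : (k : Int) + 1 = ((k + 1 : Nat) : Int) := by push_cast; ring
      have hhead : (if PySem.Int.mod (k : Int) 2 = 1 ∧ PySem.Int.mod (zOf k) 5 = 1
              then [PySem.Int.floordiv (zOf k) 5] else [])
          = (if zOf k ^ 2 < 5 * (bSt k).2 ^ 2 then
              (if PySem.Int.mod (zOf k) 5 = 1 then [PySem.Int.floordiv (zOf k) 5] else [])
             else []) := by
        rw [hkmod]
        by_cases hodd : k % 2 = 1
        · rw [if_pos ((bCond k).mpr hodd)]
          by_cases hm : PySem.Int.mod (zOf k) 5 = 1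
          · rw [if_pos hm, if_pos ⟨by exact_mod_cast congrArg (Nat.cast : Nat → Int) hodd, hm⟩]
          · rw [if_neg hm, if_neg (by intro h; exact hm h.2)]
        · have hA : ¬(((k % 2 : Nat) : Int) = 1 ∧ PySem.Int.mod (zOf k) 5 = 1) := by
            intro hand
            exact hodd (by exact_mod_cast hand.1)
          rw [if_neg hA, if_neg (by rw [bCond k]; exact hodd)]
      show (if PySem.Int.mod (k : Int) 2 = 1 ∧ PySem.Int.mod (zOf k) 5 = 1
              then [PySem.Int.floordiv (zOf k) 5] else []) ++
          nuggetStream2 (zOf (k + 1)) (4 * zOf (k + 1) + zOf k) ((k : Int) + 1) c = _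
      rw [zRec2 k, hcast, ih (k + 1), hhead]
      have hb1 := congrArg Prod.fst (bStep_z k)
      have hb2 := congrArg Prod.snd (bStep_z k)
      simp only at hb1 hb2
      show _ = (if zOf k ^ 2 < 5 * (bSt k).2 ^ 2 then
              (if PySem.Int.mod (zOf k) 5 = 1 then [PySem.Int.floordiv (zOf k) 5] else [])
             else []) ++
          pyLoop2 (zOf k * 2 + 5 * (bSt k).2 * 1) (zOf k * 1 + (bSt k).2 * 2) c
      rw [hb1, hb2]

-- ---- the merge ----

def mergeRec : List Int → List Int → List Int
  | [], b => b
  | a, [] => a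
  | x :: a, y :: b => if x ≤ y then x :: mergeRec a (y :: b) else y :: mergeRec (x :: a) b

theorem mergeLoop_eq_aux (a b : List Int) (m : Nat) : ∀ i j : Nat,
    a.length - i + (b.length - j) ≤ m → mergeLoop a b m i j = mergeRec (a.drop i) (b.drop j) := by
  induction m with
  | zero =>
      intro i j hm
      rw [mergeLoop]
      rw [List.drop_eq_nil_of_le (by omega), List.drop_eq_nil_of_le (by omega)]
      simp [mergeRec]
  | succ m ih =>
      intro i j hm
      rw [mergeLoop]
      by_cases h : i < a.length ∧ j < b.length
      · obtain ⟨hi, hj⟩ := h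
        rw [if_pos ⟨hi, hj⟩, List.getD_eq_getElem a 0 hi, List.getD_eq_getElem b 0 hj,
          List.drop_eq_getElem_cons hi, List.drop_eq_getElem_cons hj]
        by_cases hle : a[i] ≤ b[j]
        · rw [if_pos hle, mergeRec, if_pos hle, ih (i + 1) j (by omega),
            List.drop_eq_getElem_cons hj]
        · rw [if_neg hle, mergeRec, if_neg hle, ih i (j + 1) (by omega),
            List.drop_eq_getElem_cons hi]
      · rw [if_neg h]
        by_cases hi : i < a.length
        · rw [List.drop_eq_nil_of_le (show b.length ≤ j by omega)]
          cases hd : a.drop i with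
          | nil => simp [mergeRec]
          | cons x t => simp [mergeRec]
        · rw [List.drop_eq_nil_of_le (show a.length ≤ i by omega)]
          simp [mergeRec]

theorem mergeRec_perm : ∀ (a b : List Int), (mergeRec a b).Perm (a ++ b) := by
  intro a
  induction a with
  | nil => intro b; simp [mergeRec]
  | cons x a iha =>
      intro b
      induction b with
      | nil => simp [mergeRec]
      | cons y b ihb =>
          rw [mergeRec]
          by_cases hle : x ≤ y
          · rw [if_pos hle]
            exact ((iha (y :: b)).cons x)
          · rw [if_neg hle]
            exact (ihb.cons y).trans List.perm_middle.symm

theorem mergeRec_pairwise : ∀ (a b : List Int), a.Pairwise (· < ·) → b.Pairwise (· < ·) →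
    (∀ x ∈ a, ∀ y ∈ b, x ≠ y) → (mergeRec a b).Pairwise (· < ·) := by
  intro a
  induction a with
  | nil => intro b _ hb _; simpa [mergeRec] using hb
  | cons x a iha =>
      intro b ha hb hne
      induction b with
      | nil => simpa [mergeRec] using ha
      | cons y b ihb =>
          rw [mergeRec]
          rw [List.pairwise_cons] at ha hb
          by_cases hle : x ≤ y
          · rw [if_pos hle]
            have hxy : x < y :=
              lt_of_le_of_ne hle (hne x (List.mem_cons_self) y (List.mem_cons_self))
            refine List.pairwise_cons.mpr ⟨?_, ?_⟩
            · intro z hz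
              have hz' : z ∈ a ++ y :: b := (mergeRec_perm a (y :: b)).mem_iff.mp hz
              rcases List.mem_append.mp hz' with hz' | hz'
              · exact ha.1 z hz'
              · rcases List.mem_cons.mp hz' with rfl | hz'
                · exact hxy
                · exact hxy.trans (hb.1 z hz')
            · exact iha (y :: b) ha.2 (List.pairwise_cons.mpr hb)
                (fun u hu v hv => hne u (List.mem_cons_of_mem x hu) v hv)
          · rw [if_neg hle]
            have hyx : y < x := lt_of_not_ge hle
            refine List.pairwise_cons.mpr ⟨?_, ?_⟩
            · intro z hz
              have hz' : z ∈ (x :: a) ++ b := (mergeRec_perm (x :: a) b).mem_iff.mp hz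
              rcases List.mem_append.mp hz' with hz' | hz'
              · rcases List.mem_cons.mp hz' with rfl | hz'
                · exact hyx
                · exact hyx.trans (ha.1 z hz')
              · exact hb.1 z hz'
            · exact ihb hb.2
                (fun u hu v hv => hne u hu v (List.mem_cons_of_mem y hv))

-- ---- assembling the equivalence ----

theorem golden_nuggets_spec_aux (n : Int) (hn : 1 ≤ n) :
    golden_nuggets n = golden_nuggets_alt n := by
  obtain ⟨m, rfl⟩ : ∃ m : Nat, n = (m : Int) := ⟨n.toNat, by omega⟩
  have hN : (3 * (m : Int)).toNat = 3 * m := by omega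
  -- the index lists
  set I1 : List Nat := (List.range (3 * m)).filterMap
      (fun k => if k % 2 = 0 then some (3 * (k / 2)) else none) with hI1
  set I2 : List Nat := (List.range (3 * m)).filterMap
      (fun k => if k % 4 = 1 then some (3 * (k / 4) + 1) else none) with hI2
  -- A's two loops produce I1.map pN and I2.map pN
  have h1 : pyLoop1 1 1 (3 * m) = I1.map pN := by
    have h0 : (aSt 0).1 = 1 ∧ (aSt 0).2 = 1 := by decide
    have hch := loop1_char (3 * m) 0
    rw [h0.1, h0.2] at hch
    simp only [Nat.zero_add] at hch
    rw [hch, hI1, List.map_filterMap]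
    apply List.filterMap_congr
    intro k _
    by_cases h : k % 2 = 0 <;> simp [h]
  have h2 : pyLoop2 3 1 (3 * m) = I2.map pN := by
    have h0 : zOf 0 = 3 ∧ (bSt 0).2 = 1 := by decide
    have hch := loop2_char (3 * m) 0
    rw [h0.1, h0.2] at hch
    simp only [Nat.zero_add] at hch
    rw [hch, hI2, List.map_filterMap]
    apply List.filterMap_congr
    intro k _
    by_cases h : k % 4 = 1 <;> simp [h]
  -- B's two streams produce the very same lists
  have hs1 : nuggetStream1 1 29 (3 * m) = I1.map pN := by
    have h0 : (aSt 0).1 = 1 ∧ (aSt 1).1 = 29 := by decide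
    have := stream1_eq (3 * m) 0
    rw [h0.1, h0.2, show (aSt 0).2 = 1 from by decide] at this
    rw [this, h1]
  have hs2 : nuggetStream2 3 11 0 (3 * m) = I2.map pN := by
    have h0 : zOf 0 = 3 ∧ zOf 1 = 11 := by decide
    have := stream2_eq (3 * m) 0
    rw [h0.1, h0.2, show (bSt 0).2 = 1 from by decide] at this
    simpa [h2] using this
  -- membership in the index lists
  have hmem1 : ∀ i : Nat, i ∈ I1 → i % 3 = 0 := by
    intro i hi
    rw [hI1] at hi
    obtain ⟨k, _, hf⟩ := List.mem_filterMap.mp hi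
    by_cases h : k % 2 = 0
    · rw [if_pos h] at hf
      have : 3 * (k / 2) = i := Option.some.inj hf
      omega
    · rw [if_neg h] at hf; exact absurd hf (by simp)
  have hmem2 : ∀ i : Nat, i ∈ I2 → i % 3 = 1 := by
    intro i hi
    rw [hI2] at hi
    obtain ⟨k, _, hf⟩ := List.mem_filterMap.mp hi
    by_cases h : k % 4 = 1
    · rw [if_pos h] at hf
      have : 3 * (k / 4) + 1 = i := Option.some.inj hf
      omega
    · rw [if_neg h] at hf; exact absurd hf (by simp)
  -- the index lists are strictly increasing
  have hp1 : I1.Pairwise (· < ·) := by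
    rw [hI1]
    refine List.Pairwise.filterMap _ ?_ List.pairwise_lt_range
    intro k k' hkk' u hu v hv
    by_cases h : k % 2 = 0 <;> by_cases h' : k' % 2 = 0 <;> simp [h, h'] at hu hv
    omega
  have hp2 : I2.Pairwise (· < ·) := by
    rw [hI2]
    refine List.Pairwise.filterMap _ ?_ List.pairwise_lt_range
    intro k k' hkk' u hu v hv
    by_cases h : k % 4 = 1 <;> by_cases h' : k' % 4 = 1 <;> simp [h, h'] at hu hv
    omega
  -- hence the value streams are strictly increasing and mutually disjoint
  have hq1 : (I1.map pN).Pairwise (· < ·) := hp1.map pN (fun _ _ h => pN_mono h)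
  have hq2 : (I2.map pN).Pairwise (· < ·) := hp2.map pN (fun _ _ h => pN_mono h)
  have hcross : ∀ x ∈ I1.map pN, ∀ y ∈ I2.map pN, x ≠ y := by
    intro x hx y hy
    obtain ⟨i, hi, rfl⟩ := List.mem_map.mp hx
    obtain ⟨i', hi', rfl⟩ := List.mem_map.mp hy
    intro hxy
    have : i = i' := pN_mono.injective hxy
    have h1 := hmem1 i hi
    have h2 := hmem2 i' hi'
    omega
  -- unfold both ports and conclude by the sorted-merge characterisation
  show PySem.List.sorted (pyLoop1 1 1 (3 * (m : Int)).toNat ++ pyLoop2 3 1 (3 * (m : Int)).toNat)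
      (fun x => x) false
      = mergeLoop (nuggetStream1 1 29 (3 * (m : Int)).toNat)
          (nuggetStream2 3 11 0 (3 * (m : Int)).toNat)
          ((nuggetStream1 1 29 (3 * (m : Int)).toNat).length +
            (nuggetStream2 3 11 0 (3 * (m : Int)).toNat).length) 0 0
  rw [hN, h1, h2, hs1, hs2,
    mergeLoop_eq_aux (I1.map pN) (I2.map pN)
      ((I1.map pN).length + (I2.map pN).length) 0 0 (by omega),
    List.drop_zero, List.drop_zero]
  exact PySem.List.sorted_eq_of_perm_of_pairwise_lt _ _ _
    (mergeRec_perm (I1.map pN) (I2.map pN))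
    (mergeRec_pairwise (I1.map pN) (I2.map pN) hq1 hq2 hcross)

-- ===== VERDICT (by name: the statement is the Claim_ definition above) =====
theorem golden_nuggets_spec : Claim_equal_golden_nuggets := by
  intro n _ hn
  exact golden_nuggets_spec_aux n hn
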